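-- pv_equiv track=rewrite | github.com/mastrich00/Test | submission/base_agents.py | greedy_connection_agent
-- ===== SOURCE A (Python) =====
-- def infer_player(board):
--     our   = sum(cell == 1  for row in board for cell in row)
--     their = sum(cell == -1 for row in board for cell in row)
--     if our == their:
--         return 1, -1    # White's turn
--     else:
--         return -1, 1    # Black's turn
--
-- def greedy_connection_agent(board, action_set):
--     size = len(board)
--     player, _ = infer_player(board)
--
--     neighbors = [(-1,0),(1,0),(0,-1),(0,1),(-1,1),(1,-1)]
--     def count_neighbors(mv):
--         r, c = mv
--         return sum(1 for dx,dy in neighbors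
--                    if 0 <= r+dx < size and 0 <= c+dy < size and board[r+dx][c+dy] == player)
--
--     return max(action_set, key=count_neighbors)
-- ===== SOURCE B (Python) =====
-- def greedy_connection_agent(board, action_set):
--     # whose turn: equal piece counts means White (1) to move, otherwise Black (-1)
--     diff = 0
--     for row in board:
--         for cell in row:
--             if cell == 1:
--                 diff += 1
--             elif cell == -1:
--                 diff -= 1
--     player = 1 if diff == 0 else -1
--
--     # scatter pass: each stone of `player` adds 1 to each of its 6 hex neighbours
--     cnt = {}
--     for r, row in enumerate(board):
--         for c, cell in enumerate(row):
--             if cell == player: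
--                 for dr, dc in ((-1, 0), (1, 0), (0, -1), (0, 1), (-1, 1), (1, -1)):
--                     key = (r + dr, c + dc)
--                     cnt[key] = cnt.get(key, 0) + 1
--
--     # first candidate with the maximal score, in action_set order
--     best = action_set[0]
--     best_score = cnt.get(best, 0)
--     for mv in action_set[1:]:
--         s = cnt.get(mv, 0)
--         if s > best_score:
--             best, best_score = mv, s
--     return best
-- ===== Notes on version B (the rewrite author's own statement) =====
-- stated objective: alternative
-- what changed: Instead of gathering, per candidate move, over its 6 hex neighbour cells with bound checks, B makes one scatter pass over the board in which every stone of the player to move (inferred from a single count-difference pass) increments a score-dict entry for each of its 6 neighbours, then scans action_set once keeping the first maximum; …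
-- outside the precondition, e.g. on greedy_connection_agent([[0, 0, 1], [0, 0, -1]], [(0, 0), (1, 1)]): A returns (0, 0), B returns (1, 1)
import Mathlib
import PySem

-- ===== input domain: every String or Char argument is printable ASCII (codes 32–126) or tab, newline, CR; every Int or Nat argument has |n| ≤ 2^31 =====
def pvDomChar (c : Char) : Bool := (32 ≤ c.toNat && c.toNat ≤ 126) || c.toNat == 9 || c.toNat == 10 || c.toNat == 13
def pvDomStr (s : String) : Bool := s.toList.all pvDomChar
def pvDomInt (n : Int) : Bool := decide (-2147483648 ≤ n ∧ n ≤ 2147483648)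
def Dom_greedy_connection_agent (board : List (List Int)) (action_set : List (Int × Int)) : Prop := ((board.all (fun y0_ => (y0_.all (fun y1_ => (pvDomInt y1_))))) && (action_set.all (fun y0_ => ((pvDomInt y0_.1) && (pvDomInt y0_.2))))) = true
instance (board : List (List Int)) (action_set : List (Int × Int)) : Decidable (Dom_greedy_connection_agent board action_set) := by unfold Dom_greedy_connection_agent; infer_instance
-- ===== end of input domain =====

-- ===== PORT A =====
-- B replaces A's per-move neighbour gather by one scatter pass over the board; alternative decomposition, same cost.
def pvOffs : List (Int × Int) := [(-1,0),(1,0),(0,-1),(0,1),(-1,1),(1,-1)]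

def pvInferPlayer (board : List (List Int)) : Int × Int :=
  let our := board.foldl (fun a row => row.foldl (fun a cell => a + (if cell == 1 then (1:Int) else 0)) a) 0
  let their := board.foldl (fun a row => row.foldl (fun a cell => a + (if cell == (-1) then (1:Int) else 0)) a) 0
  if our == their then (1, -1) else (-1, 1)

-- A's inner 'count_neighbors'; the board access is exact under Pre_ (out-of-range access would raise in Python)
def pvCountNeighbors (board : List (List Int)) (size player : Int) (mv : Int × Int) : Int :=
  pvOffs.foldl (fun acc d =>
    if (decide (0 ≤ mv.1 + d.1) && decide (mv.1 + d.1 < size) && decide (0 ≤ mv.2 + d.2) && decide (mv.2 + d.2 < size)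
        && (PySem.List.pyGetD (PySem.List.pyGetD board (mv.1 + d.1) []) (mv.2 + d.2) 0 == player))
    then acc + 1 else acc) 0

def greedy_connection_agent (board : List (List Int)) (action_set : List (Int × Int)) : Int × Int :=
  let size : Int := board.length
  let player := (pvInferPlayer board).1
  (PySem.List.max? action_set (fun mv => pvCountNeighbors board size player mv)).getD (0, 0)

-- ===== PORT B =====
def greedy_connection_agent_alt (board : List (List Int)) (action_set : List (Int × Int)) : Int × Int :=
  let diff := board.foldl (fun a row => row.foldl (fun a cell =>
      if cell == 1 then a + 1 else if cell == (-1) then a - 1 else a) a) (0 : Int)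
  let player : Int := if diff == 0 then 1 else -1
  let cnt := (PySem.List.enumerate board 0).foldl (fun d rc =>
      (PySem.List.enumerate rc.2 0).foldl (fun d cc =>
        if cc.2 == player then
          ([((-1:Int),(0:Int)),(1,0),(0,-1),(0,1),(-1,1),(1,-1)] : List (Int × Int)).foldl
            (fun d off => d.modify (rc.1 + off.1, cc.1 + off.2) 0 (fun v => v + 1)) d
        else d) d) (PySem.Dict.empty : PySem.Dict (Int × Int) Int)
  let best := PySem.List.pyGetD action_set 0 ((0:Int), (0:Int))
  let p := (PySem.List.slice action_set (some 1) none).foldl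
      (fun bp mv => let s := cnt.getD mv 0; if s > bp.2 then (mv, s) else bp)
      (best, cnt.getD best 0)
  p.1

-- ===== PRECONDITION & SPEC =====
-- Pre_ excludes the empty action_set (A's max raises ValueError), ragged boards where a candidate's
-- in-bounds neighbour index falls past a short row (A raises IndexError), and ragged boards carrying a
-- stone (±1) beyond the size×size square, which A's bound check silently ignores while B's scatter
-- counts it — a hex board is square, so either value on such ragged boards is an implementation artefact.
def Pre_greedy_connection_agent (board : List (List Int)) (action_set : List (Int × Int)) : Prop :=
  action_set ≠ [] ∧
  (∀ mv ∈ action_set, ∀ d ∈ pvOffs,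
    0 ≤ mv.1 + d.1 → mv.1 + d.1 < (board.length : Int) → 0 ≤ mv.2 + d.2 → mv.2 + d.2 < (board.length : Int) →
      mv.2 + d.2 < ((PySem.List.pyGetD board (mv.1 + d.1) []).length : Int)) ∧
  (∀ row ∈ board, ∀ c ∈ row.drop board.length, ¬(c = 1 ∨ c = -1))
instance (board : List (List Int)) (action_set : List (Int × Int)) : Decidable (Pre_greedy_connection_agent board action_set) := by
  unfold Pre_greedy_connection_agent; infer_instance

def pvWitness_greedy_connection_agent : List (List Int) × (List (Int × Int)) := ([[0]], [(0, 0)])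

def Spec_greedy_connection_agent (board : List (List Int)) (action_set : List (Int × Int)) (out : Int × Int) : Prop :=
  out = greedy_connection_agent_alt board action_set
instance (board : List (List Int)) (action_set : List (Int × Int)) (out : Int × Int) : Decidable (Spec_greedy_connection_agent board action_set out) := by
  unfold Spec_greedy_connection_agent; infer_instance

-- ===== CLAIM (what is proved, stated in full; the proofs are below) =====
def Claim_equal_greedy_connection_agent : Prop := ∀ (board : List (List Int)) (action_set : List (Int × Int)), Dom_greedy_connection_agent board action_set → Pre_greedy_connection_agent board action_set → Spec_greedy_connection_agent board action_set (greedy_connection_agent board action_set)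


-- ===== LEMMAS AND PROOFS =====

-- the list of qualifying cell coordinates of B's scatter pass
def pvCells (board : List (List Int)) (player : Int) : List (Int × Int) :=
  (PySem.List.enumerate board 0).flatMap (fun rc =>
    (PySem.List.enumerate rc.2 0).flatMap (fun cc =>
      if cc.2 == player then [(rc.1, cc.1)] else []))

-- A's per-offset indicator
def pvPhi (board : List (List Int)) (size player a b : Int) : Int :=
  if (decide (0 ≤ a) && decide (a < size) && decide (0 ≤ b) && decide (b < size)
      && (PySem.List.pyGetD (PySem.List.pyGetD board a []) b 0 == player)) then 1 else 0

theorem pv_count_flatMap {a b : Type} [BEq b] (l : List a) (f : a -> List b) (v : b) :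
    (l.flatMap f).count v = (l.map (fun x => (f x).count v)).sum := by
  induction l with
  | nil => simp
  | cons x xs ih => simp [List.flatMap_cons, List.count_append, ih]

theorem pv_sum_map_add {a : Type} (l : List a) (f g : a -> Nat) :
    (l.map (fun x => f x + g x)).sum = (l.map f).sum + (l.map g).sum := by
  induction l with
  | nil => simp
  | cons x xs ih => simp [ih]; omega

theorem pv_count_as_sum {a : Type} [BEq a] (l : List a) (v : a) :
    l.count v = (l.map (fun x => if x == v then 1 else 0)).sum := by
  induction l with
  | nil => simp
  | cons x xs ih => rw [List.count_cons, ih]; simp only [List.map_cons, List.sum_cons]; omega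

theorem pv_swap (os : List (Int × Int)) (cells : List (Int × Int)) (mv : Int × Int) :
    (cells.flatMap (fun p => os.map (fun o => (p.1 + o.1, p.2 + o.2)))).count mv
      = (os.map (fun o => cells.count (mv.1 - o.1, mv.2 - o.2))).sum := by
  induction os with
  | nil => rw [pv_count_flatMap]; simp
  | cons o os ih =>
      have h2 : (fun p : Int × Int =>
            (((o :: os).map (fun o' => (p.1 + o'.1, p.2 + o'.2))).count mv)
          ) = fun p =>
            ((os.map (fun o' => (p.1 + o'.1, p.2 + o'.2))).count mv)
              + (if p == (mv.1 - o.1, mv.2 - o.2) then 1 else 0) := by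
        funext p
        have hiff : ((p.1 + o.1, p.2 + o.2) == mv) = (p == (mv.1 - o.1, mv.2 - o.2)) := by
          rcases mv with ⟨m1, m2⟩; rcases p with ⟨p1, p2⟩
          by_cases h : (p1 + o.1, p2 + o.2) = (m1, m2)
          · have h' : (p1, p2) = (m1 - o.1, m2 - o.2) := by
              simp only [Prod.mk.injEq] at h ⊢; omega
            rw [h, h']; simp
          · have h' : (p1, p2) ≠ (m1 - o.1, m2 - o.2) := by
              intro hc; apply h
              simp only [Prod.mk.injEq] at hc ⊢; omega
            simp [h, h']
        rw [List.map_cons, List.count_cons, hiff]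
      rw [pv_count_flatMap, h2, pv_sum_map_add, ← pv_count_as_sum, ← pv_count_flatMap, ih]
      simp [List.map_cons]
      omega

theorem pv_row_count (player : Int) (row : List Int) (r j a b : Int) :
    ((PySem.List.enumerate row j).flatMap (fun cc =>
        if cc.2 == player then [(r, cc.1)] else [])).count (a, b)
      = if a = r ∧ j ≤ b ∧ b < j + (row.length : Int) ∧ row.getD (b - j).toNat 0 = player
        then 1 else 0 := by
  induction row generalizing j with
  | nil =>
      rw [PySem.List.enumerate_nil]
      simp only [List.flatMap_nil, List.count_nil, List.length_nil]
      split
      · omega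
      · rfl
  | cons x xs ih =>
      rw [PySem.List.enumerate_cons, List.flatMap_cons, List.count_append, ih (j + 1)]
      have hhead : (List.count (a, b) (if x == player then [(r, j)] else []))
          = if a = r ∧ b = j ∧ x = player then 1 else 0 := by
        by_cases hx : x = player
        · have hc : (x == player) = true := by simp [hx]
          simp only [hc, if_true]
          by_cases hab : a = r ∧ b = j
          · rw [if_pos ⟨hab.1, hab.2, hx⟩, hab.1, hab.2]
            simp
          · rw [if_neg (by tauto)]
            have hne : (r, j) ≠ (a, b) := by
              intro hc; apply hab
              simp only [Prod.mk.injEq] at hc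
              exact ⟨hc.1.symm, hc.2.symm⟩
            simp [hne]
        · have hc : (x == player) = false := by simp [hx]
          rw [hc]
          simp only [Bool.false_eq_true, if_false, List.count_nil]
          rw [if_neg (by tauto)]
      rw [hhead]
      by_cases hb : b = j
      · subst hb
        have h0 : (b - b).toNat = 0 := by omega
        simp only [h0, List.getD_cons_zero, List.length_cons]
        have h4 : ¬ (a = r ∧ b + 1 ≤ b ∧ b < b + 1 + (xs.length : Int) ∧ xs.getD (b - (b + 1)).toNat 0 = player) := by
          rintro ⟨-, h, -⟩; omega
        rw [if_neg h4]
        have h5 : (a = r ∧ True ∧ x = player)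
            ↔ (a = r ∧ b ≤ b ∧ b < b + ((xs.length + 1 : Nat) : Int) ∧ x = player) := by
          constructor
          · rintro ⟨u1, -, u4⟩; exact ⟨u1, le_refl _, by omega, u4⟩
          · rintro ⟨u1, -, -, u4⟩; exact ⟨u1, trivial, u4⟩
        rw [if_congr h5 rfl rfl]
        simp
      · have h1 : ¬ (a = r ∧ b = j ∧ x = player) := by tauto
        rw [if_neg h1]
        by_cases hbj : j + 1 ≤ b
        · have h2 : (b - j).toNat = (b - (j + 1)).toNat + 1 := by omega
          simp only [h2, List.getD_cons_succ, List.length_cons]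
          have h5 : (a = r ∧ j + 1 ≤ b ∧ b < j + 1 + (xs.length : Int) ∧ xs.getD (b - (j + 1)).toNat 0 = player)
              ↔ (a = r ∧ j ≤ b ∧ b < j + ((xs.length + 1 : Nat) : Int) ∧ xs.getD (b - (j + 1)).toNat 0 = player) := by
            constructor
            · rintro ⟨u1, u2, u3, u5⟩; exact ⟨u1, by omega, by omega, u5⟩
            · rintro ⟨u1, u2, u3, u5⟩; exact ⟨u1, hbj, by omega, u5⟩
          simp only [h5]
          simp
        · have h2 : ¬ (a = r ∧ j + 1 ≤ b ∧ b < j + 1 + (xs.length : Int) ∧ xs.getD (b - (j + 1)).toNat 0 = player) := by tauto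
          have h3 : ¬ (a = r ∧ j ≤ b ∧ b < j + ((x :: xs).length : Int) ∧ (x :: xs).getD (b - j).toNat 0 = player) := by
            intro hc; exact hb (by omega)
          rw [if_neg h2, if_neg h3]

theorem pv_grid_count (player : Int) (bd : List (List Int)) (k a b : Int) :
    ((PySem.List.enumerate bd k).flatMap (fun rc =>
        (PySem.List.enumerate rc.2 0).flatMap (fun cc =>
          if cc.2 == player then [(rc.1, cc.1)] else []))).count (a, b)
      = if k ≤ a ∧ a < k + (bd.length : Int) ∧ 0 ≤ b
            ∧ b < ((bd.getD (a - k).toNat []).length : Int)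
            ∧ (bd.getD (a - k).toNat []).getD b.toNat 0 = player
        then 1 else 0 := by
  induction bd generalizing k with
  | nil =>
      rw [PySem.List.enumerate_nil]
      simp only [List.flatMap_nil, List.count_nil, List.length_nil]
      rw [if_neg (by rintro ⟨u1, u2, -⟩; omega)]
  | cons row rows ih =>
      rw [PySem.List.enumerate_cons, List.flatMap_cons, List.count_append, ih (k + 1),
          pv_row_count player row k 0 a b]
      by_cases ha : a = k
      · subst ha
        have hneg2 : ¬ (a + 1 ≤ a ∧ a < a + 1 + (rows.length : Int) ∧ 0 ≤ b
            ∧ b < ((rows.getD (a - (a + 1)).toNat []).length : Int)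
            ∧ (rows.getD (a - (a + 1)).toNat []).getD b.toNat 0 = player) := by
          rintro ⟨u1, -⟩; omega
        rw [if_neg hneg2]
        have h0 : (a - a).toNat = 0 := by omega
        simp only [h0, List.getD_cons_zero, List.length_cons, sub_zero]
        have h5 : (True ∧ 0 ≤ b ∧ b < 0 + (row.length : Int) ∧ row.getD b.toNat 0 = player)
            ↔ (a ≤ a ∧ a < a + ((rows.length + 1 : Nat) : Int) ∧ 0 ≤ b
                ∧ b < (row.length : Int) ∧ row.getD b.toNat 0 = player) := by
          constructor
          · rintro ⟨-, u2, u3, u5⟩; exact ⟨le_refl _, by omega, u2, by omega, u5⟩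
          · rintro ⟨-, -, u3, u5, u6⟩; exact ⟨trivial, u3, by omega, u6⟩
        simp only [h5]
        simp
      · rw [if_neg (by rintro ⟨u1, -⟩; exact ha u1)]
        by_cases hak : k + 1 ≤ a
        · have h2 : (a - k).toNat = (a - (k + 1)).toNat + 1 := by omega
          simp only [h2, List.getD_cons_succ, List.length_cons]
          have h5 : (k + 1 ≤ a ∧ a < k + 1 + (rows.length : Int) ∧ 0 ≤ b
                ∧ b < ((rows.getD (a - (k + 1)).toNat []).length : Int)
                ∧ (rows.getD (a - (k + 1)).toNat []).getD b.toNat 0 = player)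
              ↔ (k ≤ a ∧ a < k + ((rows.length + 1 : Nat) : Int) ∧ 0 ≤ b
                ∧ b < ((rows.getD (a - (k + 1)).toNat []).length : Int)
                ∧ (rows.getD (a - (k + 1)).toNat []).getD b.toNat 0 = player) := by
            constructor
            · rintro ⟨u1, u2, u3, u4, u6⟩; exact ⟨by omega, by omega, u3, u4, u6⟩
            · rintro ⟨u1, u2, u3, u4, u6⟩; exact ⟨hak, by omega, u3, u4, u6⟩
          simp only [h5]
          simp
        · rw [if_neg (by rintro ⟨u1, -⟩; omega), if_neg (by rintro ⟨u1, u2, -⟩; omega)]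

theorem pv_cells_phi (bd : List (List Int)) (player a b : Int)
    (hp : player = 1 ∨ player = -1)
    (hH : ∀ row ∈ bd, ∀ c ∈ row.drop bd.length, ¬(c = 1 ∨ c = -1)) :
    ((pvCells bd player).count (a, b) : Int) = pvPhi bd (bd.length : Int) player a b := by
  have hp0 : player ≠ 0 := by rcases hp with h | h <;> omega
  unfold pvCells pvPhi
  rw [pv_grid_count player bd 0 a b]
  by_cases ha0 : 0 ≤ a
  · by_cases hab : a < (bd.length : Int)
    · by_cases hb0 : 0 ≤ b
      · have ha' : (a - 0).toNat = a.toNat := by omega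
        have hga : PySem.List.pyGetD bd a [] = bd.getD a.toNat [] := by
          conv_lhs => rw [← Int.toNat_of_nonneg ha0]
          rw [PySem.List.pyGetD_natCast]
        have hgb : PySem.List.pyGetD (bd.getD a.toNat []) b 0 = (bd.getD a.toNat []).getD b.toNat 0 := by
          conv_lhs => rw [← Int.toNat_of_nonneg hb0]
          rw [PySem.List.pyGetD_natCast]
        rw [ha', hga, hgb]
        set row := bd.getD a.toNat [] with hrow
        by_cases hcond : b < ((row.length : Nat) : Int) ∧ row.getD b.toNat 0 = player
        · -- the cell exists and holds the player: show b < size from hH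
          have hmem : row ∈ bd := by
            have hlt : a.toNat < bd.length := by omega
            rw [hrow, List.getD_eq_getElem _ _ hlt]
            exact List.getElem_mem hlt
          have hbs : b < (bd.length : Int) := by
            by_contra hc
            have h1 : bd.length ≤ b.toNat := by omega
            have h2 : b.toNat < row.length := by omega
            have hel : row.getD b.toNat 0 = row[b.toNat] := List.getD_eq_getElem _ _ h2
            have hdrop : row[b.toNat] ∈ row.drop bd.length := by
              have h3 : b.toNat - bd.length < (row.drop bd.length).length := by
                rw [List.length_drop]; omega
              have h4 : (row.drop bd.length)[b.toNat - bd.length] = row[b.toNat] := by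
                rw [List.getElem_drop]
                congr 1
                omega
              rw [← h4]
              exact List.getElem_mem h3
            have := hH row hmem _ hdrop
            apply this
            rw [← hel, hcond.2]
            exact hp
          rw [if_pos ⟨ha0, by omega, hb0, hcond.1, hcond.2⟩,
              if_pos (by
                simp only [Bool.and_eq_true, decide_eq_true_eq, beq_iff_eq]
                exact ⟨⟨⟨⟨ha0, hab⟩, hb0⟩, hbs⟩, hcond.2⟩)]
          simp
        · -- no qualifying cell: both sides are 0
          rw [if_neg (by rintro ⟨-, -, -, u1, u2⟩; exact hcond ⟨u1, u2⟩)]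
          by_cases hbl : b < ((row.length : Nat) : Int)
          · have h2 : row.getD b.toNat 0 ≠ player := by tauto
            rw [if_neg (by
              simp only [Bool.and_eq_true, decide_eq_true_eq, beq_iff_eq]
              rintro ⟨-, u⟩
              exact h2 u)]
            simp
          · have h3 : row.length ≤ b.toNat := by omega
            have h4 : row.getD b.toNat 0 = 0 := List.getD_eq_default _ _ h3
            rw [if_neg (by
              simp only [Bool.and_eq_true, decide_eq_true_eq, beq_iff_eq]
              rintro ⟨-, u⟩
              rw [h4] at u
              exact hp0 u.symm)]
            simp
      · rw [if_neg (by rintro ⟨-, -, u, -⟩; omega),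
            if_neg (by
              simp only [Bool.and_eq_true, decide_eq_true_eq, beq_iff_eq]
              rintro ⟨⟨⟨-, u⟩, -⟩, -⟩
              omega)]
        simp
    · rw [if_neg (by rintro ⟨-, u, -⟩; omega),
          if_neg (by
            simp only [Bool.and_eq_true, decide_eq_true_eq, beq_iff_eq]
            rintro ⟨⟨⟨⟨-, u⟩, -⟩, -⟩, -⟩
            omega)]
      simp
  · rw [if_neg (by rintro ⟨u, -⟩; omega),
        if_neg (by
          simp only [Bool.and_eq_true, decide_eq_true_eq, beq_iff_eq]
          rintro ⟨⟨⟨⟨u, -⟩, -⟩, -⟩, -⟩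
          omega)]
    simp

theorem pv_flatMap_assoc {a b c : Type} (l : List a) (f : a -> List b) (g : b -> List c) :
    (l.flatMap f).flatMap g = l.flatMap (fun x => (f x).flatMap g) := by
  induction l with
  | nil => simp
  | cons x xs ih => simp [List.flatMap_cons, List.flatMap_append, ih]

theorem pv_countA_sum (bd : List (List Int)) (size player : Int) (mv : Int × Int) :
    pvCountNeighbors bd size player mv
      = (pvOffs.map (fun d => pvPhi bd size player (mv.1 + d.1) (mv.2 + d.2))).sum := by
  unfold pvCountNeighbors pvPhi
  have h : (fun (acc : Int) (d : Int × Int) =>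
        if (decide (0 ≤ mv.1 + d.1) && decide (mv.1 + d.1 < size) && decide (0 ≤ mv.2 + d.2) && decide (mv.2 + d.2 < size)
            && (PySem.List.pyGetD (PySem.List.pyGetD bd (mv.1 + d.1) []) (mv.2 + d.2) 0 == player))
        then acc + 1 else acc)
      = (fun (acc : Int) (d : Int × Int) => acc +
          (if (decide (0 ≤ mv.1 + d.1) && decide (mv.1 + d.1 < size) && decide (0 ≤ mv.2 + d.2) && decide (mv.2 + d.2 < size)
              && (PySem.List.pyGetD (PySem.List.pyGetD bd (mv.1 + d.1) []) (mv.2 + d.2) 0 == player))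
          then (1:Int) else 0)) := by
    funext acc d
    split <;> omega
  rw [h, PySem.List.foldl_add]
  omega

theorem pv_cnt_getD (bd : List (List Int)) (player : Int)
    (hp : player = 1 ∨ player = -1)
    (hH : ∀ row ∈ bd, ∀ c ∈ row.drop bd.length, ¬(c = 1 ∨ c = -1)) (mv : Int × Int) :
    (((PySem.List.enumerate bd 0).foldl (fun d rc =>
        (PySem.List.enumerate rc.2 0).foldl (fun d cc =>
          if cc.2 == player then
            ([((-1:Int),(0:Int)),(1,0),(0,-1),(0,1),(-1,1),(1,-1)] : List (Int × Int)).foldl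
              (fun d off => d.modify (rc.1 + off.1, cc.1 + off.2) 0 (fun v => v + 1)) d
          else d) d) (PySem.Dict.empty : PySem.Dict (Int × Int) Int)).getD mv 0)
      = pvCountNeighbors bd ((bd.length : Nat) : Int) player mv := by
  have hbody : (fun (d : PySem.Dict (Int × Int) Int) (rc : Int × List Int) =>
      (PySem.List.enumerate rc.2 0).foldl (fun d cc =>
        if cc.2 == player then
          ([((-1:Int),(0:Int)),(1,0),(0,-1),(0,1),(-1,1),(1,-1)] : List (Int × Int)).foldl
            (fun d off => d.modify (rc.1 + off.1, cc.1 + off.2) 0 (fun v => v + 1)) d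
        else d) d)
      = (fun (d : PySem.Dict (Int × Int) Int) (rc : Int × List Int) =>
        (((PySem.List.enumerate rc.2 0).flatMap (fun cc =>
          if cc.2 == player then
            ([((-1:Int),(0:Int)),(1,0),(0,-1),(0,1),(-1,1),(1,-1)] : List (Int × Int)).map
              (fun off => (rc.1 + off.1, cc.1 + off.2))
          else [])).foldl (fun d x => d.modify x 0 (fun v => v + 1)) d)) := by
    funext d rc
    rw [List.foldl_flatMap]
    congr 1
    funext d' cc
    split
    · rw [List.foldl_map]
    · rfl
  rw [hbody, ← List.foldl_flatMap, PySem.Dict.getD_foldl_modify_add_one]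
  have hsc : ((PySem.List.enumerate bd 0).flatMap (fun rc =>
      (PySem.List.enumerate rc.2 0).flatMap (fun cc =>
        if cc.2 == player then
          ([((-1:Int),(0:Int)),(1,0),(0,-1),(0,1),(-1,1),(1,-1)] : List (Int × Int)).map
            (fun off => (rc.1 + off.1, cc.1 + off.2))
        else [])))
      = (pvCells bd player).flatMap (fun p =>
          ([((-1:Int),(0:Int)),(1,0),(0,-1),(0,1),(-1,1),(1,-1)] : List (Int × Int)).map
            (fun o => (p.1 + o.1, p.2 + o.2))) := by
    unfold pvCells
    rw [pv_flatMap_assoc]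
    congr 1
    funext rc
    rw [pv_flatMap_assoc]
    congr 1
    funext cc
    split
    · simp
    · rfl
  rw [hsc, pv_swap, pv_countA_sum]
  simp only [List.map_cons, List.map_nil, List.sum_cons, List.sum_nil, PySem.Dict.getD_empty]
  push_cast
  rw [pv_cells_phi bd player _ _ hp hH, pv_cells_phi bd player _ _ hp hH, pv_cells_phi bd player _ _ hp hH,
      pv_cells_phi bd player _ _ hp hH, pv_cells_phi bd player _ _ hp hH, pv_cells_phi bd player _ _ hp hH]
  norm_num [pvOffs, ← sub_eq_add_neg]
  ring

theorem pv_delta_row (row : List Int) :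
    (row.map (fun c => if c == 1 then (1:Int) else if c == (-1) then -1 else 0)).sum
      = (row.map (fun c => if c == 1 then (1:Int) else 0)).sum
        - (row.map (fun c => if c == (-1) then (1:Int) else 0)).sum := by
  induction row with
  | nil => simp
  | cons x xs ih =>
      simp only [List.map_cons, List.sum_cons, ih]
      split_ifs <;> simp_all <;> ring

theorem pv_delta_board (bd : List (List Int)) :
    (bd.map (fun row => (row.map (fun c => if c == 1 then (1:Int) else if c == (-1) then -1 else 0)).sum)).sum
      = (bd.map (fun row => (row.map (fun c => if c == 1 then (1:Int) else 0)).sum)).sum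
        - (bd.map (fun row => (row.map (fun c => if c == (-1) then (1:Int) else 0)).sum)).sum := by
  induction bd with
  | nil => simp
  | cons r rs ih => simp only [List.map_cons, List.sum_cons, ih, pv_delta_row r]; ring

theorem pv_player_eq (bd : List (List Int)) :
    (if (bd.foldl (fun a row => row.foldl (fun a cell =>
          if cell == 1 then a + 1 else if cell == (-1) then a - 1 else a) a) (0 : Int)) == 0
      then (1:Int) else -1) = (pvInferPlayer bd).1 := by
  have hD : bd.foldl (fun a row => row.foldl (fun a cell =>
        if cell == 1 then a + 1 else if cell == (-1) then a - 1 else a) a) (0 : Int)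
      = (bd.map (fun row => (row.map (fun c => if c == 1 then (1:Int) else if c == (-1) then -1 else 0)).sum)).sum := by
    have h1 : (fun (a : Int) (cell : Int) => if cell == 1 then a + 1 else if cell == (-1) then a - 1 else a)
        = fun a cell => a + (if cell == 1 then (1:Int) else if cell == (-1) then -1 else 0) := by
      funext a c; split_ifs <;> ring
    have h2 : (fun (a : Int) (row : List Int) => row.foldl (fun a cell =>
          if cell == 1 then a + 1 else if cell == (-1) then a - 1 else a) a)
        = fun a row => a + (row.map (fun c => if c == 1 then (1:Int) else if c == (-1) then -1 else 0)).sum := by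
      funext a row; rw [h1, PySem.List.foldl_add]
    rw [h2, PySem.List.foldl_add, zero_add]
  have hO : ∀ (g : Int -> Int), bd.foldl (fun a row => row.foldl (fun a cell => a + g cell) a) (0 : Int)
      = (bd.map (fun row => (row.map g).sum)).sum := by
    intro g
    have h2 : (fun (a : Int) (row : List Int) => row.foldl (fun a cell => a + g cell) a)
        = fun a row => a + (row.map g).sum := by
      funext a row; rw [PySem.List.foldl_add]
    rw [h2, PySem.List.foldl_add, zero_add]
  have hIf : ∀ (X Y : Int), (if ((X - Y) == 0) = true then (1:Int) else -1)
      = ((if (X == Y) = true then ((1:Int),(-1:Int)) else (-1,1)).1) := by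
    intro X Y
    by_cases h : X = Y
    · subst h; simp
    · have h2 : ((X - Y : Int) == 0) = false := by simp; omega
      have h3 : (X == Y) = false := by simp [h]
      rw [h2, h3]; simp
  unfold pvInferPlayer
  rw [hD, pv_delta_board]
  rw [hO (fun c => if c == 1 then (1:Int) else 0), hO (fun c => if c == (-1) then (1:Int) else 0)]
  exact hIf _ _

theorem pv_max_cons (key : (Int × Int) → Int) : ∀ (t : List (Int × Int)) (m : Int × Int),
    PySem.List.max? (m :: t) key
      = some (t.foldl (fun b x => if key b < key x then x else b) m) := by
  intro t
  induction t with
  | nil => intro m; rfl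
  | cons x xs ih =>
      intro m
      by_cases h : key m < key x
      · have e1 : PySem.List.max? (m :: x :: xs) key = PySem.List.max? (x :: xs) key := by
          unfold PySem.List.max?
          rw [List.foldl_cons, List.foldl_cons, List.foldl_cons]
          congr 1
          show (if key m < key x then some x else some m) = some x
          rw [if_pos h]
        rw [e1, ih x]
        conv_rhs => rw [List.foldl_cons]
        rw [if_pos h]
      · have e1 : PySem.List.max? (m :: x :: xs) key = PySem.List.max? (m :: xs) key := by
          unfold PySem.List.max?
          rw [List.foldl_cons, List.foldl_cons, List.foldl_cons]
          congr 1
          show (if key m < key x then some x else some m) = some m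
          rw [if_neg h]
        rw [e1, ih m]
        conv_rhs => rw [List.foldl_cons]
        rw [if_neg h]

theorem pv_scan (key : (Int × Int) → Int) (rest : List (Int × Int)) :
    ∀ (b : Int × Int),
      rest.foldl (fun bp mv => if key mv > bp.2 then (mv, key mv) else bp) (b, key b)
      = (rest.foldl (fun b x => if key b < key x then x else b) b,
         key (rest.foldl (fun b x => if key b < key x then x else b) b)) := by
  induction rest with
  | nil => intro b; rfl
  | cons x xs ih =>
      intro b
      simp only [List.foldl_cons]
      by_cases h : key b < key x
      · rw [if_pos (by simpa [gt_iff_lt] using h), if_pos h, ih]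
      · rw [if_neg (by simpa [gt_iff_lt] using h), if_neg h, ih]

theorem pv_main (bd : List (List Int)) (m : Int × Int) (rest : List (Int × Int))
    (hH : ∀ row ∈ bd, ∀ c ∈ row.drop bd.length, ¬(c = 1 ∨ c = -1)) :
    greedy_connection_agent bd (m :: rest) = greedy_connection_agent_alt bd (m :: rest) := by
  simp only [greedy_connection_agent, greedy_connection_agent_alt]
  have hplayer := pv_player_eq bd
  set playerA := (pvInferPlayer bd).1 with hA
  have hp : playerA = 1 ∨ playerA = -1 := by
    rw [hA]
    have hgen : ∀ (X Y : Int), ((if (X == Y) = true then ((1:Int),(-1:Int)) else (-1,1)).1) = 1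
        ∨ ((if (X == Y) = true then ((1:Int),(-1:Int)) else (-1,1)).1) = -1 := by
      intro X Y; split
      · left; rfl
      · right; rfl
    exact hgen _ _
  set key := fun mv => pvCountNeighbors bd ((bd.length : Nat) : Int) playerA mv with hkeydef
  rw [hplayer]
  have hkey : ∀ mv, (((PySem.List.enumerate bd 0).foldl (fun d rc =>
        (PySem.List.enumerate rc.2 0).foldl (fun d cc =>
          if cc.2 == playerA then
            ([((-1:Int),(0:Int)),(1,0),(0,-1),(0,1),(-1,1),(1,-1)] : List (Int × Int)).foldl
              (fun d off => d.modify (rc.1 + off.1, cc.1 + off.2) 0 (fun v => v + 1)) d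
          else d) d) (PySem.Dict.empty : PySem.Dict (Int × Int) Int)).getD mv 0)
      = key mv := fun mv => pv_cnt_getD bd playerA hp hH mv
  rw [pv_max_cons key rest m, Option.getD_some]
  rw [PySem.List.pyGetD_zero_cons, PySem.List.slice_from_one, List.tail_cons]
  have hfun : (fun (bp : (Int × Int) × Int) (mv : Int × Int) =>
        if (((PySem.List.enumerate bd 0).foldl (fun d rc =>
          (PySem.List.enumerate rc.2 0).foldl (fun d cc =>
            if cc.2 == playerA then
              ([((-1:Int),(0:Int)),(1,0),(0,-1),(0,1),(-1,1),(1,-1)] : List (Int × Int)).foldl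
                (fun d off => d.modify (rc.1 + off.1, cc.1 + off.2) 0 (fun v => v + 1)) d
            else d) d) (PySem.Dict.empty : PySem.Dict (Int × Int) Int)).getD mv 0) > bp.2
        then (mv, (((PySem.List.enumerate bd 0).foldl (fun d rc =>
          (PySem.List.enumerate rc.2 0).foldl (fun d cc =>
            if cc.2 == playerA then
              ([((-1:Int),(0:Int)),(1,0),(0,-1),(0,1),(-1,1),(1,-1)] : List (Int × Int)).foldl
                (fun d off => d.modify (rc.1 + off.1, cc.1 + off.2) 0 (fun v => v + 1)) d
            else d) d) (PySem.Dict.empty : PySem.Dict (Int × Int) Int)).getD mv 0))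
        else bp)
      = fun bp mv => if key mv > bp.2 then (mv, key mv) else bp := by
    funext bp mv
    rw [hkey mv]
  rw [hkey m, hfun, pv_scan key rest m]

theorem greedy_connection_agent_spec : Claim_equal_greedy_connection_agent := by
  intro bd as hDom hPre
  unfold Spec_greedy_connection_agent
  obtain ⟨hne, -, hH⟩ := hPre
  rcases as with _ | ⟨m, rest⟩
  · exact absurd rfl hne
  · exact pv_main bd m rest hH

-- ===== VERDICT (by name: the statement is the Claim_ definition above) =====
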